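-- pv_equiv track=rewrite | github.com/Illiadan/AlgoExpert | Easy_ClassPhotos/app.py | classPhotos
-- ===== SOURCE A (Python) =====
-- def classPhotos(redShirtHeights, blueShirtHeights):
--
--     rSHSorted = sorted(redShirtHeights)
--     bSHSorted = sorted(blueShirtHeights)
--     out = []
--
--     for i in range(len(redShirtHeights)):
--         if rSHSorted[i] < bSHSorted[i]:
--             out.append(0)
--         elif rSHSorted[i] > bSHSorted[i]:
--             out.append(1)
--         else:
--             out.append(2 * len(redShirtHeights))
--
--     if sum(out) == 0 or sum(out) == len(redShirtHeights):
--         return True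
--
--     return False
-- ===== SOURCE B (Python) =====
-- def classPhotos(redShirtHeights, blueShirtHeights):
--     if not redShirtHeights:
--         return True
--     taller = sorted(redShirtHeights)
--     shorter = sorted(blueShirtHeights)
--     if taller[0] == shorter[0]:
--         return False
--     if taller[0] < shorter[0]:
--         taller, shorter = shorter, taller
--     for t, s in zip(taller, shorter):
--         if t <= s:
--             return False
--     return True
-- ===== Notes on version B (the rewrite author's own statement) =====
-- stated objective: simpler
-- what changed: Replaces A's coded list (0/1/2n sentinel entries) plus sum test with a determine-orientation-from-the-smallest-elements step followed by one directional scan over the zipped sorted lists with early exit.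
import Mathlib
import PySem

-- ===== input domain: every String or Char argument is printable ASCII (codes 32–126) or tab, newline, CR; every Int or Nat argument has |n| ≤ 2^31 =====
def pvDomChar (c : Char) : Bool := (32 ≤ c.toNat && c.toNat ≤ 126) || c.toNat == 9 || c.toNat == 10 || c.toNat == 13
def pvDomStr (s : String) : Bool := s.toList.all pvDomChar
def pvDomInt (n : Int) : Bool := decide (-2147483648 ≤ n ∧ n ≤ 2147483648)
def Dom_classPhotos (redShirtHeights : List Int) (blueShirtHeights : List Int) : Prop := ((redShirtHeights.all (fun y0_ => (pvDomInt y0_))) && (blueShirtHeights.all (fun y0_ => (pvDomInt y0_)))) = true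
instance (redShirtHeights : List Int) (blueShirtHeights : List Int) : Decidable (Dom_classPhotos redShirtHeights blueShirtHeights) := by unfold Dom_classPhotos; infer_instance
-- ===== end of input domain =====

-- B replaces A's coded list (0/1/2n entries) + sum sentinel with an orientation check on
-- the sorted heads followed by one directional scan with early exit (objective: simpler).

-- ===== PORT A =====
-- indexing rSHSorted[i]/bSHSorted[i] is in range for every i in range(len(red)) under
-- Pre_classPhotos, so pyGetD with a default is exact there
def classPhotos (redShirtHeights : List Int) (blueShirtHeights : List Int) : Bool :=
  let rSHSorted := PySem.List.sorted redShirtHeights (fun x => x) false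
  let bSHSorted := PySem.List.sorted blueShirtHeights (fun x => x) false
  let out := (PySem.List.pyRange 0 (redShirtHeights.length : Int) 1).foldl
    (fun acc i =>
      if PySem.List.pyGetD rSHSorted i 0 < PySem.List.pyGetD bSHSorted i 0 then acc ++ [(0 : Int)]
      else if PySem.List.pyGetD rSHSorted i 0 > PySem.List.pyGetD bSHSorted i 0 then acc ++ [(1 : Int)]
      else acc ++ [2 * (redShirtHeights.length : Int)]) []
  if out.sum = 0 ∨ out.sum = (redShirtHeights.length : Int) then true else false

-- ===== PORT B =====
-- the early-exit for-loop of Source B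
def classPhotosAltScan : List (Int × Int) → Bool
  | [] => true
  | (t, s) :: rest => if t ≤ s then false else classPhotosAltScan rest

def classPhotos_alt (redShirtHeights : List Int) (blueShirtHeights : List Int) : Bool :=
  if redShirtHeights = [] then true
  else
    let taller := PySem.List.sorted redShirtHeights (fun x => x) false
    let shorter := PySem.List.sorted blueShirtHeights (fun x => x) false
    -- taller[0]/shorter[0]: both lists are nonempty under Pre_classPhotos in this branch
    if PySem.List.pyGetD taller 0 0 = PySem.List.pyGetD shorter 0 0 then false
    else
      let ts := if PySem.List.pyGetD taller 0 0 < PySem.List.pyGetD shorter 0 0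
                then (shorter, taller) else (taller, shorter)
      classPhotosAltScan (ts.1.zip ts.2)

-- ===== PRECONDITION & SPEC =====
-- Pre_ excludes exactly the inputs where A raises IndexError: blueShirtHeights shorter
-- than redShirtHeights (A indexes the sorted blue list at every i < len(red)).
def Pre_classPhotos (redShirtHeights : List Int) (blueShirtHeights : List Int) : Prop :=
  redShirtHeights.length ≤ blueShirtHeights.length
instance (redShirtHeights : List Int) (blueShirtHeights : List Int) : Decidable (Pre_classPhotos redShirtHeights blueShirtHeights) := by unfold Pre_classPhotos; infer_instance

def pvWitness_classPhotos : List Int × List Int := ([1, 2], [2, 3])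

def Spec_classPhotos (redShirtHeights : List Int) (blueShirtHeights : List Int) (out : Bool) : Prop := out = classPhotos_alt redShirtHeights blueShirtHeights
instance (redShirtHeights : List Int) (blueShirtHeights : List Int) (out : Bool) : Decidable (Spec_classPhotos redShirtHeights blueShirtHeights out) := by unfold Spec_classPhotos; infer_instance

-- ===== CLAIM (what is proved, stated in full; the proofs are below) =====
def Claim_equal_classPhotos : Prop := ∀ (redShirtHeights : List Int) (blueShirtHeights : List Int), Dom_classPhotos redShirtHeights blueShirtHeights → Pre_classPhotos redShirtHeights blueShirtHeights → Spec_classPhotos redShirtHeights blueShirtHeights (classPhotos redShirtHeights blueShirtHeights)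

-- ===== LEMMAS AND PROOFS =====

-- the value A appends at a pair of aligned sorted heights
def pvCode (n : Int) (p : Int × Int) : Int :=
  if p.1 < p.2 then 0 else if p.1 > p.2 then 1 else 2 * n

lemma pvScan_eq_all (l : List (Int × Int)) :
    classPhotosAltScan l = l.all (fun p => decide (p.2 < p.1)) := by
  induction l with
  | nil => rfl
  | cons p rest ih =>
    obtain ⟨t, s⟩ := p
    simp only [classPhotosAltScan, List.all_cons, ih]
    by_cases h : t ≤ s
    · simp [h, not_lt.mpr h]
    · simp [h, lt_of_not_ge h]

lemma pvSum_code (n : Int) (l : List (Int × Int)) :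
    (l.map (pvCode n)).sum =
      (l.countP (fun p => decide (p.2 < p.1)) : Int) +
        2 * n * (l.countP (fun p => decide (p.1 = p.2)) : Int) := by
  induction l with
  | nil => simp
  | cons p rest ih =>
    simp only [List.map_cons, List.sum_cons, pvCode]
    rcases lt_trichotomy p.1 p.2 with h | h | h
    · rw [if_pos h, List.countP_cons_of_neg (by simp; omega),
        List.countP_cons_of_neg (by simp; omega)]
      linear_combination ih
    · have h1 : ¬ p.1 < p.2 := by omega
      have h2 : ¬ p.1 > p.2 := by omega
      rw [if_neg h1, if_neg h2, List.countP_cons_of_neg (by simp; omega),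
        List.countP_cons_of_pos (by simp [h])]
      push_cast
      linear_combination ih
    · have h1 : ¬ p.1 < p.2 := by omega
      rw [if_neg h1, if_pos h, List.countP_cons_of_pos (by simp; omega),
        List.countP_cons_of_neg (by simp; omega)]
      push_cast
      linear_combination ih

lemma pvCounts_le (l : List (Int × Int)) :
    l.countP (fun p => decide (p.2 < p.1)) + l.countP (fun p => decide (p.1 = p.2)) ≤ l.length := by
  induction l with
  | nil => simp
  | cons p rest ih =>
    simp only [List.countP_cons, List.length_cons]
    by_cases h1 : p.2 < p.1 <;> by_cases h2 : p.1 = p.2 <;> simp [h1, h2] <;> omega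

lemma pvSum_zero_iff (l : List (Int × Int)) (hl : l ≠ []) :
    (l.map (pvCode l.length)).sum = 0 ↔ ∀ p ∈ l, p.1 < p.2 := by
  rw [pvSum_code]
  have hc := pvCounts_le l
  have hn : 1 ≤ l.length := List.length_pos_iff.mpr hl
  constructor
  · intro h
    have h1 : (l.countP (fun p => decide (p.2 < p.1)) : Int) = 0 ∧
        (l.countP (fun p => decide (p.1 = p.2)) : Int) = 0 := by
      set c1 := (l.countP (fun p => decide (p.2 < p.1)) : Int) with hc1
      set c2 := (l.countP (fun p => decide (p.1 = p.2)) : Int) with hc2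
      have h10 : 0 ≤ c1 := by positivity
      have h20 : 0 ≤ c2 := by positivity
      have hnn : (1 : Int) ≤ (l.length : Int) := by exact_mod_cast hn
      have hz : c2 = 0 := by nlinarith
      constructor
      · rw [hz] at h; linarith
      · exact hz
    have e1 : l.countP (fun p => decide (p.2 < p.1)) = 0 := by exact_mod_cast h1.1
    have e2 : l.countP (fun p => decide (p.1 = p.2)) = 0 := by exact_mod_cast h1.2
    rw [List.countP_eq_zero] at e1 e2
    intro p hp
    have := e1 p hp
    have := e2 p hp
    simp at *
    omega
  · intro h
    have e1 : l.countP (fun p => decide (p.2 < p.1)) = 0 := by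
      rw [List.countP_eq_zero]; intro p hp; have := h p hp; simp; omega
    have e2 : l.countP (fun p => decide (p.1 = p.2)) = 0 := by
      rw [List.countP_eq_zero]; intro p hp; have := h p hp; simp; omega
    rw [e1, e2]; ring

lemma pvSum_len_iff (l : List (Int × Int)) (hl : l ≠ []) :
    (l.map (pvCode l.length)).sum = l.length ↔ ∀ p ∈ l, p.2 < p.1 := by
  rw [pvSum_code]
  have hc := pvCounts_le l
  have hn : 1 ≤ l.length := List.length_pos_iff.mpr hl
  constructor
  · intro h
    set c1 := l.countP (fun p => decide (p.2 < p.1)) with hc1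
    set c2 := l.countP (fun p => decide (p.1 = p.2)) with hc2
    have h2 : c2 = 0 := by
      by_contra h2
      have h21 : (1 : Int) ≤ (c2 : Int) := by exact_mod_cast Nat.one_le_iff_ne_zero.mpr h2
      have h10 : (0 : Int) ≤ (c1 : Int) := by positivity
      have hcI : (c1 : Int) + (c2 : Int) ≤ (l.length : Int) := by exact_mod_cast hc
      have hnI : (1 : Int) ≤ (l.length : Int) := by exact_mod_cast hn
      nlinarith
    have h1 : c1 = l.length := by
      rw [h2] at h
      push_cast at h
      omega
    have := List.countP_eq_length.mp h1
    intro p hp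
    simpa using this p hp
  · intro h
    have e1 : l.countP (fun p => decide (p.2 < p.1)) = l.length := by
      rw [List.countP_eq_length]; intro p hp; simpa using h p hp
    have e2 : l.countP (fun p => decide (p.1 = p.2)) = 0 := by
      rw [List.countP_eq_zero]; intro p hp; have := h p hp; simp; omega
    rw [e1, e2]; ring

lemma pvZip_swap_all (l1 l2 : List Int) :
    (l2.zip l1).all (fun p => decide (p.2 < p.1)) = (l1.zip l2).all (fun p => decide (p.1 < p.2)) := by
  induction l1 generalizing l2 with
  | nil => cases l2 <;> rfl
  | cons x t ih => cases l2 with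
    | nil => rfl
    | cons y s => simp [List.zip_cons_cons, ih]

-- A's loop-and-sum body reduces to the coded sum over the zipped sorted lists
lemma classPhotos_eq_sum (red blue : List Int) (hpre : red.length ≤ blue.length) :
    classPhotos red blue =
      (if (((PySem.List.sorted red (fun x => x) false).zip
              (PySem.List.sorted blue (fun x => x) false)).map (pvCode red.length)).sum = 0 ∨
          (((PySem.List.sorted red (fun x => x) false).zip
              (PySem.List.sorted blue (fun x => x) false)).map (pvCode red.length)).sum = (red.length : Int)
       then true else false) := by
  unfold classPhotos
  dsimp only
  set r := PySem.List.sorted red (fun x => x) false with hr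
  set b := PySem.List.sorted blue (fun x => x) false with hb
  have hrl : r.length = red.length := PySem.List.length_sorted ..
  have hbl : b.length = blue.length := PySem.List.length_sorted ..
  have hfun : (fun (acc : List Int) (i : Int) =>
      if PySem.List.pyGetD r i 0 < PySem.List.pyGetD b i 0 then acc ++ [(0 : Int)]
      else if PySem.List.pyGetD r i 0 > PySem.List.pyGetD b i 0 then acc ++ [(1 : Int)]
      else acc ++ [2 * (red.length : Int)]) =
      (fun acc i => acc ++ [pvCode red.length (PySem.List.pyGetD r i 0, PySem.List.pyGetD b i 0)]) := by
    funext acc i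
    simp only [pvCode]
    split_ifs <;> rfl
  rw [hfun, PySem.List.foldl_append_singleton_eq_map, List.nil_append,
    PySem.List.pyRange_zero_natCast, List.map_map]
  have hml : (List.range red.length).map
      ((fun i => pvCode (red.length : Int) (PySem.List.pyGetD r i 0, PySem.List.pyGetD b i 0)) ∘
        (fun k : Nat => (k : Int))) = (r.zip b).map (pvCode (red.length : Int)) := by
    apply List.ext_getElem
    · simp [List.length_zip, hrl, hbl]
      omega
    · intro k hk1 hk2
      simp only [List.getElem_map, List.getElem_range, List.getElem_zip, Function.comp]
      congr 1
      have hkr : k < r.length := by simp at hk1; omega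
      have hkb : k < b.length := by simp at hk1; omega
      rw [PySem.List.pyGetD_natCast, PySem.List.pyGetD_natCast]
      simp [List.getD_eq_getElem?_getD, hkr, hkb]
  rw [hml]

-- ===== VERDICT (by name: the statement is the Claim_ definition above) =====
theorem classPhotos_spec : Claim_equal_classPhotos := by
  intro red blue _hdom hpre
  unfold Spec_classPhotos
  rcases eq_or_ne red [] with hred | hred
  · subst hred
    simp [classPhotos, classPhotos_alt]
  · have hpre' : red.length ≤ blue.length := hpre
    rw [classPhotos_eq_sum red blue hpre']
    unfold classPhotos_alt
    rw [if_neg hred]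
    dsimp only
    set r := PySem.List.sorted red (fun x => x) false with hrdef
    set b := PySem.List.sorted blue (fun x => x) false with hbdef
    have hrl : r.length = red.length := PySem.List.length_sorted ..
    have hbl : b.length = blue.length := PySem.List.length_sorted ..
    have hrne : r ≠ [] := by
      rw [hrdef, Ne, PySem.List.sorted_eq_nil_iff]; exact hred
    have hbne : b ≠ [] := by
      intro h
      have : blue.length = 0 := by rw [← hbl, h]; rfl
      have : red.length = 0 := by omega
      exact hred (List.length_eq_zero_iff.mp this)
    obtain ⟨r0, r', hr0⟩ := List.exists_cons_of_ne_nil hrne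
    obtain ⟨b0, b', hb0⟩ := List.exists_cons_of_ne_nil hbne
    have hzl : (r.zip b).length = red.length := by
      simp [List.length_zip, hrl, hbl]; omega
    have hzne : r.zip b ≠ [] := by
      intro h
      have := hzl
      rw [h] at this
      simp at this
      exact hred (List.length_eq_zero_iff.mp this.symm)
    have hmem0 : (r0, b0) ∈ r.zip b := by rw [hr0, hb0]; simp [List.zip_cons_cons]
    have hgr : PySem.List.pyGetD r 0 0 = r0 := by rw [hr0]; exact PySem.List.pyGetD_zero_cons ..
    have hgb : PySem.List.pyGetD b 0 0 = b0 := by rw [hb0]; exact PySem.List.pyGetD_zero_cons ..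
    have hsum0 := pvSum_zero_iff (r.zip b) hzne
    have hsumn := pvSum_len_iff (r.zip b) hzne
    rw [hzl] at hsum0 hsumn
    rw [hgr, hgb]
    rcases lt_trichotomy r0 b0 with h | h | h
    · rw [if_neg (show ¬ (r0 = b0) from by omega)]
      simp only [if_pos h]
      rw [pvScan_eq_all, pvZip_swap_all]
      by_cases hall : ∀ p ∈ r.zip b, p.1 < p.2
      · rw [if_pos (Or.inl (hsum0.mpr hall))]
        symm
        rw [List.all_eq_true]
        intro p hp
        simpa using hall p hp
      · have hns : ¬ ((r.zip b).map (pvCode red.length)).sum = (red.length : Int) := by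
          intro hs
          have := hsumn.mp hs (r0, b0) hmem0
          simp at this
          omega
        have hn0 : ¬ ((r.zip b).map (pvCode red.length)).sum = 0 := by
          intro hs
          exact hall (hsum0.mp hs)
        rw [if_neg (show ¬ _ from by tauto)]
        symm
        rw [List.all_eq_false]
        obtain ⟨p, hp, hplt⟩ := by push_neg at hall; exact hall
        exact ⟨p, hp, by simp [not_lt.mpr hplt]⟩
    · rw [if_pos h]
      have hn0 : ¬ ((r.zip b).map (pvCode red.length)).sum = 0 := by
        intro hs
        have := hsum0.mp hs (r0, b0) hmem0
        omega
      have hnn : ¬ ((r.zip b).map (pvCode red.length)).sum = (red.length : Int) := by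
        intro hs
        have := hsumn.mp hs (r0, b0) hmem0
        simp at this
        omega
      rw [if_neg (show ¬ _ from by tauto)]
    · rw [if_neg (show ¬ (r0 = b0) from by omega)]
      simp only [if_neg (show ¬ (r0 < b0) from by omega)]
      rw [pvScan_eq_all]
      by_cases hall : ∀ p ∈ r.zip b, p.2 < p.1
      · rw [if_pos (Or.inr (hsumn.mpr hall))]
        symm
        rw [List.all_eq_true]
        intro p hp
        simpa using hall p hp
      · have hn0 : ¬ ((r.zip b).map (pvCode red.length)).sum = 0 := by
          intro hs
          have := hsum0.mp hs (r0, b0) hmem0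
          omega
        have hnn : ¬ ((r.zip b).map (pvCode red.length)).sum = (red.length : Int) := by
          intro hs
          exact hall (hsumn.mp hs)
        rw [if_neg (show ¬ _ from by tauto)]
        symm
        rw [List.all_eq_false]
        obtain ⟨p, hp, hplt⟩ := by push_neg at hall; exact hall
        exact ⟨p, hp, by simp [not_lt.mpr hplt]⟩
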